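-- pv_equiv track=rewrite | github.com/marcelblijleven/adventofcode | src/adventofcode/year_2023/day_02_2023.py | check_minimum
-- ===== SOURCE A (Python) =====
-- import math
--
-- def check_minimum(game_values: list[dict[str, int]]) -> int:
--     minimums: dict[str, int] = {}
--
--     for game_value in game_values:
--         for color, value in game_value.items():
--             if color not in minimums:
--                 minimums[color] = value
--             else:
--                 minimums[color] = max(value, minimums[color])
--     return math.prod(minimums.values())
-- ===== SOURCE B (Python) =====
-- import math
--
-- def check_minimum(game_values: list[dict[str, int]]) -> int:
--     # Different decomposition: first collect every color that appears (ordered dedup),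
--     # then compute each color's maximum by rescanning all games, then take the product.
--     colors = dict.fromkeys(color for game in game_values for color in game)
--     return math.prod(
--         max(game[color] for game in game_values if color in game)
--         for color in colors
--     )
-- ===== Notes on version B (the rewrite author's own statement) =====
-- stated objective: alternative
-- what changed: Replaces the single incremental dict-merge pass with a two-phase nested-scan decomposition: first an ordered-dedup list of all colors, then for each color a fresh scan of every game to take max of its values, and math.prod over those per-color maxima.
import Mathlib
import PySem

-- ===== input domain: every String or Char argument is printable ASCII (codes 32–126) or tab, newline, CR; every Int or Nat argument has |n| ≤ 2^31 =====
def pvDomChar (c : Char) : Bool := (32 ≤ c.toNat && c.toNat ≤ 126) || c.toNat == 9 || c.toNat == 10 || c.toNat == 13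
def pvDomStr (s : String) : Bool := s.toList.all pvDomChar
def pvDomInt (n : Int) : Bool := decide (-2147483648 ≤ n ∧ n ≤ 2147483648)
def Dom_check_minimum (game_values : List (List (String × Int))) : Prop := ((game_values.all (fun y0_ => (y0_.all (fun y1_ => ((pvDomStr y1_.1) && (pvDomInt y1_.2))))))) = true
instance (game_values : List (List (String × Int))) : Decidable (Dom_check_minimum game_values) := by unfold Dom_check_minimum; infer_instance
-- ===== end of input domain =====

-- B replaces A's single incremental dict-merge pass with a two-phase decomposition
-- (collect the colors, then rescan all games per color); alternative, not faster.

-- ===== PORT A =====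
-- Each element of game_values is a Python dict, represented as an association list;
-- PySem.Dict.ofList interprets it with Python dict semantics before .items() iteration.
def check_minimum (game_values : List (List (String × Int))) : Int :=
  let minimums : PySem.Dict String Int :=
    game_values.foldl (fun minimums game_value =>
      (PySem.Dict.ofList game_value).items.foldl (fun minimums p =>
        if minimums.contains p.1 = false then
          minimums.insert p.1 p.2
        else
          -- minimums[color] is a lookup that cannot fail here (contains holds): getD is exact
          minimums.insert p.1 (max p.2 (minimums.getD p.1 0))) minimums)
      PySem.Dict.empty
  minimums.values.prod

-- ===== PORT B =====
def check_minimum_alt (game_values : List (List (String × Int))) : Int :=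
  let colors := PySem.List.dedup (game_values.flatMap (fun game => (PySem.Dict.ofList game).keys))
  (colors.map (fun color =>
    -- max(game[color] for game in game_values if color in game); the generator is
    -- nonempty for every color in colors, so the .getD 1 default is never used
    (PySem.List.max?
      (game_values.filterMap (fun game => (PySem.Dict.ofList game).get? color))
      (fun y => y)).getD 1)).prod

-- ===== PRECONDITION & SPEC =====
def Spec_check_minimum (game_values : List (List (String × Int))) (out : Int) : Prop := out = check_minimum_alt game_values
instance (game_values : List (List (String × Int))) (out : Int) : Decidable (Spec_check_minimum game_values out) := by unfold Spec_check_minimum; infer_instance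

-- ===== CLAIM (what is proved, stated in full; the proofs are below) =====
def Claim_equal_check_minimum : Prop := ∀ (game_values : List (List (String × Int))), Dom_check_minimum game_values → Spec_check_minimum game_values (check_minimum game_values)

-- ===== LEMMAS AND PROOFS =====

-- A's inner loop body
def pvStep (m : PySem.Dict String Int) (p : String × Int) : PySem.Dict String Int :=
  if m.contains p.1 = false then m.insert p.1 p.2
  else m.insert p.1 (max p.2 (m.getD p.1 0))

-- running max over a list, seeded by an optional accumulator
def pvOptMax (o : Option Int) (vs : List Int) : Option Int :=
  vs.foldl (fun o v => some (match o with | none => v | some w => max w v)) o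

theorem pvStep_eq (m : PySem.Dict String Int) (p : String × Int) :
    pvStep m p = m.insert p.1 (match m.get? p.1 with | none => p.2 | some w => max w p.2) := by
  unfold pvStep
  rw [PySem.Dict.contains_eq_isSome_get?]
  cases h : m.get? p.1 <;>
    simp [PySem.Dict.getD_eq_get?_getD, h, max_comm]

theorem pvGet_foldl_step (ps : List (String × Int)) (m : PySem.Dict String Int) (c : String) :
    (ps.foldl pvStep m).get? c =
      pvOptMax (m.get? c) ((ps.filter (fun p => p.1 == c)).map (·.2)) := by
  induction ps generalizing m with
  | nil => rfl
  | cons p ps ih =>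
    rw [List.foldl_cons, ih, pvStep_eq, PySem.Dict.get?_insert]
    by_cases hc : c = p.1
    · subst hc
      simp only [List.filter_cons, beq_self_eq_true]
      rfl
    · have hb : (p.1 == c) = false := by simpa using (Ne.symm hc)
      simp [hb, hc]

-- A's whole merge loop
def pvMerge (game_values : List (List (String × Int))) : PySem.Dict String Int :=
  game_values.foldl (fun minimums game_value =>
    (PySem.Dict.ofList game_value).items.foldl pvStep minimums) PySem.Dict.empty

-- filter-then-map of an items list with distinct keys is the (≤ 1 element) lookup result
theorem pvFilter_items_nodup (l : List (String × Int)) (c : String)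
    (h : (l.map (·.1)).Nodup) :
    (l.filter (fun p => p.1 == c)).map (·.2) = ((PySem.Dict.mk l).get? c).toList := by
  induction l with
  | nil => rfl
  | cons p l ih =>
    rw [PySem.Dict.get?_mk_cons]
    simp only [List.map_cons, List.nodup_cons] at h
    by_cases hc : p.1 = c
    · subst hc
      have hnone : ∀ q ∈ l, ¬ (q.1 == p.1) = true := by
        intro q hq hbq
        exact h.1 (List.mem_map.2 ⟨q, hq, by simpa using hbq⟩)
      simp [List.filter_eq_nil_iff.2 hnone]
    · have hb : (p.1 == c) = false := by simpa using hc
      simp [hb, ih h.2]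

theorem pvMerge_get? (game_values : List (List (String × Int))) (c : String) :
    (pvMerge game_values).get? c =
      pvOptMax none (game_values.filterMap (fun g => (PySem.Dict.ofList g).get? c)) := by
  unfold pvMerge
  have key : ∀ (gvs : List (List (String × Int))) (m : PySem.Dict String Int),
      (gvs.foldl (fun minimums game_value =>
        (PySem.Dict.ofList game_value).items.foldl pvStep minimums) m).get? c =
      pvOptMax (m.get? c) (gvs.filterMap (fun g => (PySem.Dict.ofList g).get? c)) := by
    intro gvs
    induction gvs with
    | nil => intro m; rfl
    | cons g gvs ih =>
      intro m
      rw [List.foldl_cons, ih, pvGet_foldl_step,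
        pvFilter_items_nodup _ c (PySem.Dict.nodup_keys_ofList g)]
      cases h : (PySem.Dict.ofList g).get? c <;>
        simp only [List.filterMap_cons, h] <;> rfl
  exact key game_values PySem.Dict.empty

theorem pvMerge_keys (game_values : List (List (String × Int))) :
    (pvMerge game_values).keys =
      PySem.Set.ofList (game_values.flatMap (fun g => (PySem.Dict.ofList g).keys)) := by
  unfold pvMerge
  have hstep : pvStep = fun (m : PySem.Dict String Int) (p : String × Int) =>
      m.insert p.1 (match m.get? p.1 with | none => p.2 | some w => max w p.2) := by
    funext m p; exact pvStep_eq m p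
  have key : ∀ (gvs : List (List (String × Int))) (m : PySem.Dict String Int),
      (gvs.foldl (fun minimums game_value =>
        (PySem.Dict.ofList game_value).items.foldl pvStep minimums) m).keys =
      PySem.Set.update m.keys (gvs.flatMap (fun g => (PySem.Dict.ofList g).keys)) := by
    intro gvs
    induction gvs with
    | nil => intro m; simp [PySem.Set.update_nil]
    | cons g gvs ih =>
      intro m
      rw [List.foldl_cons, ih, hstep,
        PySem.Dict.keys_foldl_insert_key (key := fun p : String × Int => p.1),
        List.flatMap_cons, PySem.Set.update_append]
      rfl
  rw [key game_values PySem.Dict.empty]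
  exact PySem.Set.update_nil_left _

theorem pvMerge_keys_nodup (game_values : List (List (String × Int))) :
    (pvMerge game_values).keys.Nodup := by
  rw [pvMerge_keys]; exact PySem.Set.nodup_ofList _

theorem pvOptMax_some (vs : List Int) : ∀ a, pvOptMax (some a) vs = some (vs.foldl max a) := by
  induction vs with
  | nil => intro a; rfl
  | cons v vs ih => intro a; exact ih (max a v)

theorem pvMax?_eq_optMax (vs : List Int) :
    PySem.List.max? vs (fun y => y) = pvOptMax none vs := by
  cases vs with
  | nil => rfl
  | cons v vs =>
    rw [PySem.List.max?_id_cons]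
    exact (pvOptMax_some vs v).symm

-- ===== VERDICT (by name: the statement is the Claim_ definition above) =====
theorem check_minimum_spec : Claim_equal_check_minimum := by
  intro game_values _
  show check_minimum game_values = check_minimum_alt game_values
  unfold check_minimum check_minimum_alt
  change (pvMerge game_values).values.prod = _
  rw [PySem.Dict.values_eq_map_keys (pvMerge game_values) (pvMerge_keys_nodup game_values) 0,
    pvMerge_keys, PySem.List.dedup_eq_ofList]
  congr 1
  apply List.map_congr_left
  intro c hc
  have hne : game_values.filterMap (fun g => (PySem.Dict.ofList g).get? c) ≠ [] := by
    rw [PySem.Set.mem_ofList, List.mem_flatMap] at hc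
    obtain ⟨g, hg, hcg⟩ := hc
    have : (PySem.Dict.ofList g).contains c = true :=
      (PySem.Dict.contains_iff_mem_keys _ _).2 hcg
    rw [PySem.Dict.contains_eq_isSome_get?] at this
    obtain ⟨v, hv⟩ := Option.isSome_iff_exists.1 this
    intro hnil
    have : v ∈ game_values.filterMap (fun g => (PySem.Dict.ofList g).get? c) :=
      List.mem_filterMap.2 ⟨g, hg, hv⟩
    simp [hnil] at this
  rw [PySem.Dict.getD_eq_get?_getD, pvMerge_get?, ← pvMax?_eq_optMax]
  cases h : PySem.List.max? (game_values.filterMap (fun g => (PySem.Dict.ofList g).get? c)) (fun y => y) with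
  | none => exact absurd ((PySem.List.max?_eq_none_iff _ _).1 h) hne
  | some m => rfl
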